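-- pv_equiv track=rewrite | github.com/lushushu137/mooc | 第5周作业/ASCII希尔宾斯基地毯.py | carpet
-- ===== SOURCE A (Python) =====
-- def is_blank(lines, x, y):
--     if lines == 1:
--         return False
--     elif x in range(lines // 3, lines // 3 * 2) and y in range(
--             lines // 3, lines // 3 * 2):
--         return True
--     else:
--         return is_blank(lines // 3, x % (lines // 3), y % (lines // 3))
--
-- def carpet(lines, input):
--     output = ''
--     for x in range(lines):
--         for y in range(lines):
--             if not is_blank(lines, x, y):
--                 output += input
--             else:
--                 output += '  '
--             if x != lines - 1 and y == lines - 1: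
--                 output += '\n'
--     return output
-- ===== SOURCE B (Python) =====
-- def carpet(lines, input):
--     # Precompute, per coordinate, the list of levels at which that coordinate
--     # falls in the middle third ("band profile"); a cell is blank iff its two
--     # profiles share a level; no recursion per cell.
--     def bands(x):
--         res = []
--         cur = lines
--         while cur != 1:
--             third = cur // 3
--             res.append(third <= x < 2 * third)
--             x %= third
--             cur = third
--         return res
--     masks = [bands(x) for x in range(lines)]
--     return '\n'.join(
--         ''.join('  ' if any(a and b for a, b in zip(bx, by)) else input
--                 for by in masks)
--         for bx in masks)
-- ===== Notes on version B (the rewrite author's own statement) =====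
-- stated objective: alternative
-- what changed: Replaces the per-cell recursive is_blank by per-coordinate band profiles precomputed once with an iterative loop (a cell is blank iff its row and column profiles share a level) and assembles the output row-wise with join instead of cell-wise += with a newline condition.
import Mathlib
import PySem

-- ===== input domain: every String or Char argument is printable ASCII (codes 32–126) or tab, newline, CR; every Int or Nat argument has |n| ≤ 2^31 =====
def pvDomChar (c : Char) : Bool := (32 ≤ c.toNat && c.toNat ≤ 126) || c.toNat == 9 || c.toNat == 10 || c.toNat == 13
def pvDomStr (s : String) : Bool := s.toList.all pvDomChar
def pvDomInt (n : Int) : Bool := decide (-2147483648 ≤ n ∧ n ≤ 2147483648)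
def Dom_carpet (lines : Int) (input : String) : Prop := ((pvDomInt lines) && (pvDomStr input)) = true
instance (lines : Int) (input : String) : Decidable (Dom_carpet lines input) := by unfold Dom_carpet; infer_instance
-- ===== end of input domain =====

-- B replaces A's per-cell recursive is_blank by per-coordinate band profiles precomputed
-- once with an iterative loop (a cell is blank iff its row and column profiles share a
-- level) and assembles the output row-wise with join; objective: alternative.

-- ===== PORT A =====
-- recursive is_blank of A; the fuel argument only makes the Python recursion total in Lean
-- (on inputs inside Pre_ the chain reaches 1 before the fuel runs out).
def pvIsBlank (fuel : Nat) (lines x y : Int) : Bool :=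
  match fuel with
  | 0 => false
  | f + 1 =>
    if lines = 1 then false
    else if (PySem.Int.floordiv lines 3 ≤ x ∧ x < PySem.Int.floordiv lines 3 * 2) ∧
            (PySem.Int.floordiv lines 3 ≤ y ∧ y < PySem.Int.floordiv lines 3 * 2) then true
    else pvIsBlank f (PySem.Int.floordiv lines 3)
           (PySem.Int.mod x (PySem.Int.floordiv lines 3))
           (PySem.Int.mod y (PySem.Int.floordiv lines 3))

def carpet (lines : Int) (input : String) : String :=
  (PySem.List.pyRange 0 lines 1).foldl (fun output x =>
    (PySem.List.pyRange 0 lines 1).foldl (fun output y =>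
      let output1 := if !(pvIsBlank (lines.natAbs + 1) lines x y) then output ++ input else output ++ "  "
      if x ≠ lines - 1 ∧ y = lines - 1 then output1 ++ "\n" else output1) output) ""

-- ===== PORT B =====
-- bands(x) of Source B: the while loop, one Bool per level; fuel is the same totality guard.
def pvBands (fuel : Nat) (cur x : Int) : List Bool :=
  match fuel with
  | 0 => []
  | f + 1 =>
    if cur = 1 then []
    else
      decide (PySem.Int.floordiv cur 3 ≤ x ∧ x < 2 * PySem.Int.floordiv cur 3) ::
        pvBands f (PySem.Int.floordiv cur 3) (PySem.Int.mod x (PySem.Int.floordiv cur 3))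

-- any(a and b for a, b in zip(bx, by))
def pvBlankCell (bx by_ : List Bool) : Bool := (bx.zip by_).any (fun p => p.1 && p.2)

def carpet_alt (lines : Int) (input : String) : String :=
  let masks := (PySem.List.pyRange 0 lines 1).map (fun x => pvBands (lines.natAbs + 1) lines x)
  PySem.Str.join "\n" (masks.map (fun bx =>
    PySem.Str.join "" (masks.map (fun by_ =>
      if pvBlankCell bx by_ then "  " else input))))

-- ===== PRECONDITION & SPEC =====
-- Pre_ excludes exactly the inputs on which Python A raises ZeroDivisionError: the lines whose
-- repeated //3 chain reaches the value 2, i.e. lines ∈ [2*3^k, 3^(k+1)) for some k; within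
-- |lines| ≤ 2^31 every such k is < 20.
def Pre_carpet (lines : Int) (input : String) : Prop :=
  ∀ k : Nat, k < 20 → ¬ (2 * 3 ^ k ≤ lines ∧ lines < 3 ^ (k + 1))
instance (lines : Int) (input : String) : Decidable (Pre_carpet lines input) := by
  unfold Pre_carpet; infer_instance

def pvWitness_carpet : Int × String := (3, "##")

def Spec_carpet (lines : Int) (input : String) (out : String) : Prop := out = carpet_alt lines input
instance (lines : Int) (input : String) (out : String) : Decidable (Spec_carpet lines input out) := by unfold Spec_carpet; infer_instance

-- ===== CLAIM (what is proved, stated in full; the proofs are below) =====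
def Claim_equal_carpet : Prop := ∀ (lines : Int) (input : String), Dom_carpet lines input → Pre_carpet lines input → Spec_carpet lines input (carpet lines input)

-- ===== LEMMAS AND PROOFS =====

-- concatenation of a list of strings (''.join), the shared normal form of both sides
def pvConcat : List String → String
  | [] => ""
  | s :: l => s ++ pvConcat l

lemma pvBlankCell_cons (a b : Bool) (l1 l2 : List Bool) :
    pvBlankCell (a :: l1) (b :: l2) = ((a && b) || pvBlankCell l1 l2) := by
  simp [pvBlankCell]

-- A's recursive blank test equals B's shared-level test, at every fuel
lemma pv_blank_eq (f : Nat) : ∀ (c x y : Int),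
    pvIsBlank f c x y = pvBlankCell (pvBands f c x) (pvBands f c y) := by
  induction f with
  | zero => intro c x y; rfl
  | succ f ih =>
    intro c x y
    by_cases h1 : c = 1
    · simp [pvIsBlank, pvBands, h1, pvBlankCell]
    · simp only [pvIsBlank, pvBands, h1, if_false, pvBlankCell_cons, ← ih]
      by_cases h2 : (PySem.Int.floordiv c 3 ≤ x ∧ x < PySem.Int.floordiv c 3 * 2) ∧
                    (PySem.Int.floordiv c 3 ≤ y ∧ y < PySem.Int.floordiv c 3 * 2)
      · rw [if_pos h2]
        symm
        simp only [Bool.or_eq_true, Bool.and_eq_true, decide_eq_true_eq]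
        left
        omega
      · rw [if_neg h2]
        have hfd : PySem.Int.floordiv c 3 = c / 3 :=
          PySem.Int.floordiv_eq_ediv_of_pos (by norm_num)
        rw [hfd] at h2
        rcases hrec : pvIsBlank f (PySem.Int.floordiv c 3)
            (PySem.Int.mod x (PySem.Int.floordiv c 3))
            (PySem.Int.mod y (PySem.Int.floordiv c 3)) with _ | _
        · simp
          omega
        · simp

-- A's inner loop over ys ++ [m], when no y in ys equals m
lemma pv_inner (t : Int → Bool) (input : String) (P : Prop) [Decidable P] (m : Int) :
    ∀ (ys : List Int), (∀ y ∈ ys, y ≠ m) → ∀ acc : String,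
      (ys ++ [m]).foldl (fun o y =>
          let o1 := if !(t y) then o ++ input else o ++ "  "
          if P ∧ y = m then o1 ++ "\n" else o1) acc
        = acc ++ (pvConcat ((ys ++ [m]).map (fun y => if t y then "  " else input)) ++
            (if P then "\n" else "")) := by
  intro ys
  induction ys with
  | nil =>
    intro _ acc
    simp only [List.nil_append, List.foldl_cons, List.foldl_nil, List.map_cons, List.map_nil,
      pvConcat]
    by_cases hP : P <;> by_cases ht : t m <;>
      simp [hP, ht, String.append_assoc, String.append_empty]
  | cons y ys ih =>
    intro hmem acc
    have hy : y ≠ m := hmem y (List.mem_cons_self ..)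
    simp only [List.cons_append, List.foldl_cons, List.map_cons, pvConcat]
    rw [ih (fun z hz => hmem z (List.mem_cons_of_mem _ hz))]
    have : ¬ (P ∧ y = m) := fun h => hy h.2
    by_cases ht : t y <;> simp [this, ht, String.append_assoc]

-- a foldl whose body appends a function of the element is a concat
lemma pv_foldl_abs (F : String → Int → String) (g : Int → String)
    (H : ∀ (acc : String) (x : Int), F acc x = acc ++ g x) :
    ∀ (xs : List Int) (acc : String), xs.foldl F acc = acc ++ pvConcat (xs.map g) := by
  intro xs
  induction xs with
  | nil => intro acc; simp [pvConcat]
  | cons x xs ih => intro acc; simp [pvConcat, H, ih, String.append_assoc]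

-- ''.join is pvConcat
lemma pv_join_empty : ∀ parts : List String, PySem.Str.join "" parts = pvConcat parts := by
  intro parts
  induction parts with
  | nil => rfl
  | cons s l ih =>
    cases l with
    | nil => apply String.toList_inj.mp; simp [pvConcat, PySem.Str.join, PySem.Chars.join_singleton]
    | cons s' l' =>
      apply String.toList_inj.mp
      have := congrArg String.toList ih
      simp only [pvConcat] at this ⊢
      simp [PySem.Str.join, PySem.Chars.join_cons_cons] at this ⊢
      simpa using this

-- '\n'.join over rows indexed by ys ++ [m] is pvConcat of rows with a newline after each non-last row
lemma pv_join_nl (row : Int → String) (m : Int) :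
    ∀ (ys : List Int), (∀ x ∈ ys, x ≠ m) →
      PySem.Str.join "\n" ((ys ++ [m]).map row)
        = pvConcat ((ys ++ [m]).map (fun x => row x ++ if x ≠ m then "\n" else "")) := by
  intro ys
  induction ys with
  | nil =>
    intro _
    apply String.toList_inj.mp
    simp [pvConcat, PySem.Str.join, PySem.Chars.join_singleton]
  | cons x ys ih =>
    intro hmem
    have hx : x ≠ m := hmem x (List.mem_cons_self ..)
    have hrest : ((ys ++ [m]).map row) ≠ [] := by simp
    apply String.toList_inj.mp
    obtain ⟨b, l', hb⟩ : ∃ b l', (ys ++ [m]).map row = b :: l' := by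
      cases h : (ys ++ [m]).map row with
      | nil => exact absurd h hrest
      | cons b l' => exact ⟨b, l', rfl⟩
    have hrec := congrArg String.toList (ih (fun z hz => hmem z (List.mem_cons_of_mem _ hz)))
    simp only [List.cons_append, List.map_cons, pvConcat, hx, if_pos, ne_eq,
      not_false_eq_true] at *
    rw [hb] at hrec ⊢
    simp [PySem.Str.join, PySem.Chars.join_cons_cons] at hrec ⊢
    simp [hrec]

-- carpet_alt with its local 'masks' unfolded
lemma pv_carpet_alt_eq (lines : Int) (input : String) :
    carpet_alt lines input
      = PySem.Str.join "\n" ((PySem.List.pyRange 0 lines 1).map (fun x =>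
          PySem.Str.join "" ((PySem.List.pyRange 0 lines 1).map (fun y =>
            if pvBlankCell (pvBands (lines.natAbs + 1) lines x)
                (pvBands (lines.natAbs + 1) lines y) then "  " else input)))) := by
  simp only [carpet_alt, List.map_map, Function.comp_def]

-- ===== VERDICT (by name: the statement is the Claim_ definition above) =====
theorem carpet_spec : Claim_equal_carpet := by
  intro lines input _ _
  unfold Spec_carpet
  rw [pv_carpet_alt_eq]
  unfold carpet
  by_cases hn : lines ≤ 0
  · rw [PySem.List.pyRange_one_eq_nil hn]
    rfl
  · have h1 : (0:Int) ≤ lines - 1 := by omega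
    have hsplit : PySem.List.pyRange 0 lines 1
        = PySem.List.pyRange 0 (lines - 1) 1 ++ [lines - 1] := by
      have := PySem.List.pyRange_one_succ_right (a := 0) (b := lines - 1) h1
      simpa using this
    have hmem : ∀ x ∈ PySem.List.pyRange 0 (lines - 1) 1, x ≠ lines - 1 := by
      intro x hx
      have := (PySem.List.mem_pyRange_one).mp hx
      omega
    rw [hsplit]
    -- A side: outer fold is a concat of rows
    rw [pv_foldl_abs _ (fun x =>
        pvConcat ((PySem.List.pyRange 0 (lines - 1) 1 ++ [lines - 1]).map
          (fun y => if pvIsBlank (lines.natAbs + 1) lines x y then "  " else input)) ++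
          (if x ≠ lines - 1 then "\n" else ""))
      (fun acc x => pv_inner (fun y => pvIsBlank (lines.natAbs + 1) lines x y) input
        (x ≠ lines - 1) (lines - 1) _ hmem acc)]
    -- B side
    simp only [← pv_blank_eq, pv_join_empty]
    rw [pv_join_nl (fun x =>
        pvConcat ((PySem.List.pyRange 0 (lines - 1) 1 ++ [lines - 1]).map
          (fun y => if pvIsBlank (lines.natAbs + 1) lines x y then "  " else input)))
      (lines - 1) _ hmem]
    simp
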